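-- pv_equiv track=rewrite | github.com/DongKeun2/algorithm | Programmers/Lv4/지형 편집.py | solution
-- ===== SOURCE A (Python) =====
-- def solution(land, P, Q):
--     arr = []
--     for lst in land:
--         arr += lst
--     arr.sort()
--
--     # 최초 비용 계산(가장 낮은 층)
--     n = len(arr)
--     min_h, max_h = arr[0], arr[-1]
--     cost = 0
--     for i in range(n):
--         cost += (arr[i] - min_h) * Q
--     answer = cost
--
--     # 층이 높아지면 해당 층에 대해 계산
--     now_h = min_h
--     for i in range(n):
--         if now_h < arr[i]:
--             cost += (arr[i] - now_h) * i * P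
--             cost -= (arr[i] - now_h) * (n-i) * Q
--             now_h = arr[i]
--             answer = min(answer, cost)
--
--     return answer
-- ===== SOURCE B (Python) =====
-- def solution(land, P, Q):
--     arr = sorted(h for row in land for h in row)
--     n = len(arr)
--     total = sum(arr)
--     best = None
--     pref = 0
--     for i, h in enumerate(arr):
--         # cost of levelling everything to height h, computed from scratch:
--         # the i cells below h are raised, the n-i cells from i on are lowered.
--         c = (h * i - pref) * P + (total - pref - h * (n - i)) * Q
--         if best is None or c < best:
--             best = c
--         pref += h
--     return best
-- ===== Notes on version B (the rewrite author's own statement) =====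
-- stated objective: alternative
-- what changed: B replaces A's two passes with running-delta cost updates at each height increase by a single pass that evaluates every candidate height with a closed-form cost from a running prefix sum and the total, taking the minimum.
import Mathlib
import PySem

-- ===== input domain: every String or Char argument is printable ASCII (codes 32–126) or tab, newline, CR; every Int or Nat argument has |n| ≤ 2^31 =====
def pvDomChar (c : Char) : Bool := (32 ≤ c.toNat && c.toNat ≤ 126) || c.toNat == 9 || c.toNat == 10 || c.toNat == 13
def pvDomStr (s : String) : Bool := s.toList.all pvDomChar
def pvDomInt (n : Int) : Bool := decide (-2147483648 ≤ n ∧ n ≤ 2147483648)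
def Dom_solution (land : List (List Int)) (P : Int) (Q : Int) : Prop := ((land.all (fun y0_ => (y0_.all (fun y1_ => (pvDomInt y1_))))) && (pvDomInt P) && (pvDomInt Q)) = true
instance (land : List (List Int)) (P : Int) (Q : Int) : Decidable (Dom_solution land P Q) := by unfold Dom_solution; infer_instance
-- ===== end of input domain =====

-- B evaluates every candidate target height with a closed-form cost from a running
-- prefix sum instead of A's incremental delta updates; objective: alternative (same cost).


-- ===== PORT A =====
def solution (land : List (List Int)) (P : Int) (Q : Int) : Int :=
  let arr := PySem.List.sorted (land.foldl (fun acc lst => acc ++ lst) []) (fun x => x) false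
  let n := arr.length
  let min_h := (PySem.List.pyGet? arr 0).getD 0      -- arr[0]; IndexError on empty arr excluded by Pre_
  let _max_h := (PySem.List.pyGet? arr (-1)).getD 0  -- arr[-1] (unused by A, kept)
  let cost := arr.foldl (fun c a => c + (a - min_h) * Q) 0
  let st := (PySem.List.enumerate arr).foldl
    (fun (s : Int × Int × Int) (p : Int × Int) =>
      if s.2.1 < p.2 then
        let cost' := s.1 + (p.2 - s.2.1) * p.1 * P - (p.2 - s.2.1) * ((n : Int) - p.1) * Q
        (cost', p.2, min s.2.2 cost')
      else s)
    (cost, min_h, cost)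
  st.2.2

-- ===== PORT B =====
def solution_alt (land : List (List Int)) (P : Int) (Q : Int) : Int :=
  let arr := PySem.List.sorted (land.flatMap id) (fun x => x) false
  let n := arr.length
  let total := arr.foldl (fun acc h => acc + h) 0
  let st := (PySem.List.enumerate arr).foldl
    (fun (s : Option Int × Int) (p : Int × Int) =>
      let c := (p.2 * p.1 - s.2) * P + (total - s.2 - p.2 * ((n : Int) - p.1)) * Q
      let best := match s.1 with
        | none => some c
        | some b => if c < b then some c else some b
      (best, s.2 + p.2))
    (none, 0)
  st.1.getD 0   -- Python B returns None on empty arr; excluded by Pre_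

-- ===== PRECONDITION & SPEC =====
-- Pre_ excludes exactly the inputs with no cells at all, on which A raises IndexError (arr[0]).
def Pre_solution (land : List (List Int)) (P : Int) (Q : Int) : Prop := land.flatten ≠ []
instance (land : List (List Int)) (P : Int) (Q : Int) : Decidable (Pre_solution land P Q) := by
  unfold Pre_solution; infer_instance
def pvWitness_solution : List (List Int) × Int × Int := ([[1, 3], [2, 3]], 2, 1)

def Spec_solution (land : List (List Int)) (P : Int) (Q : Int) (out : Int) : Prop := out = solution_alt land P Q
instance (land : List (List Int)) (P : Int) (Q : Int) (out : Int) : Decidable (Spec_solution land P Q out) := by unfold Spec_solution; infer_instance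

-- ===== CLAIM (what is proved, stated in full; the proofs are below) =====
def Claim_equal_solution : Prop := ∀ (land : List (List Int)) (P : Int) (Q : Int), Dom_solution land P Q → Pre_solution land P Q → Spec_solution land P Q (solution land P Q)

-- ===== LEMMAS AND PROOFS =====

-- prefix sum of the first k heights
def pvS (arr : List Int) (k : Nat) : Int := (arr.take k).sum

-- closed-form cost of levelling everything to arr[i] (arr sorted ascending)
def pvG (arr : List Int) (P Q : Int) (i : Nat) : Int :=
  (arr.getD i 0 * (i : Int) - pvS arr i) * P +
    (arr.sum - pvS arr i - arr.getD i 0 * ((arr.length : Int) - (i : Int))) * Q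

theorem pvS_succ (arr : List Int) (k : Nat) (h : k < arr.length) :
    pvS arr (k + 1) = pvS arr k + arr.getD k 0 := by
  rw [List.getD_eq_getElem _ _ h]
  exact List.sum_take_succ arr k h

theorem pvG_delta (arr : List Int) (P Q : Int) (k : Nat) (h : k + 1 < arr.length) :
    pvG arr P Q (k + 1) =
      pvG arr P Q k
        + (arr.getD (k + 1) 0 - arr.getD k 0) * ((k : Int) + 1) * P
        - (arr.getD (k + 1) 0 - arr.getD k 0) * ((arr.length : Int) - ((k : Int) + 1)) * Q := by
  have hk : k < arr.length := Nat.lt_of_succ_lt h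
  have hs := pvS_succ arr k hk
  simp only [pvG, hs]
  push_cast
  ring

theorem sorted_flatten_step (arr : List Int) (xs : List Int)
    (ha : arr = PySem.List.sorted xs (fun x => x) false) (k : Nat) (h : k + 1 < arr.length) :
    arr.getD k 0 ≤ arr.getD (k + 1) 0 := by
  have hk : k < arr.length := Nat.lt_of_succ_lt h
  have := PySem.List.key_sorted_getElem_mono (xs := xs) (key := fun x => x)
    (p := k) (q := k + 1) (Nat.le_succ k) (ha ▸ h)
  rw [List.getD_eq_getElem _ _ hk, List.getD_eq_getElem _ _ h]
  simpa [ha] using this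

-- B's fold invariant
theorem b_fold (arr : List Int) (P Q : Int) (m k : Nat) (hmk : k + m = arr.length)
    (b : Option Int) :
    ((PySem.List.enumerate (arr.drop k) (k : Int)).foldl
      (fun (s : Option Int × Int) (p : Int × Int) =>
        let c := (p.2 * p.1 - s.2) * P + ((arr.sum - s.2 - p.2 * ((arr.length : Int) - p.1)) * Q)
        let best := match s.1 with
          | none => some c
          | some bb => if c < bb then some c else some bb
        (best, s.2 + p.2))
      (b, pvS arr k)).1
    = (List.range' k m).foldl
        (fun o i => match o with
          | none => some (pvG arr P Q i)
          | some bb => if pvG arr P Q i < bb then some (pvG arr P Q i) else some bb) b := by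
  induction m generalizing k b with
  | zero =>
      have : arr.drop k = [] := List.drop_eq_nil_of_le (by omega)
      simp [this, List.range']
  | succ m ih =>
      have hk : k < arr.length := by omega
      have hd : arr.drop k = arr[k] :: arr.drop (k + 1) := List.drop_eq_getElem_cons hk
      rw [hd, PySem.List.enumerate_cons, List.foldl_cons, List.range']
      have hg : arr[k] = arr.getD k 0 := (List.getD_eq_getElem _ _ hk).symm
      have hc : (arr[k] * (k : Int) - pvS arr k) * P +
          ((arr.sum - pvS arr k - arr[k] * ((arr.length : Int) - (k : Int))) * Q)
          = pvG arr P Q k := by rw [hg]; simp [pvG]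
      have hpref : pvS arr k + arr[k] = pvS arr (k + 1) := by
        rw [pvS_succ arr k hk, hg]
      simp only [List.foldl_cons]
      have hcast : (k : Int) + 1 = ((k + 1 : Nat) : Int) := by push_cast; ring
      rw [hc, hpref, hcast]
      exact ih (k + 1) (by omega) _

-- A's fold invariant: cost = pvG k, now_h = arr[k], ans ≤ pvG k after k+1 steps
theorem a_fold (arr : List Int) (xs : List Int)
    (ha : arr = PySem.List.sorted xs (fun x => x) false)
    (P Q : Int) (m k : Nat) (hmk : k + 1 + m = arr.length)
    (ans : Int) (hans : ans ≤ pvG arr P Q k) :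
    ((PySem.List.enumerate (arr.drop (k + 1)) ((k + 1 : Nat) : Int)).foldl
      (fun (s : Int × Int × Int) (p : Int × Int) =>
        if s.2.1 < p.2 then
          let cost' := s.1 + (p.2 - s.2.1) * p.1 * P - (p.2 - s.2.1) * ((arr.length : Int) - p.1) * Q
          (cost', p.2, min s.2.2 cost')
        else s)
      (pvG arr P Q k, arr.getD k 0, ans)).2.2
    = (List.range' (k + 1) m).foldl (fun b i => min b (pvG arr P Q i)) ans := by
  induction m generalizing k ans with
  | zero =>
      have : arr.drop (k + 1) = [] := List.drop_eq_nil_of_le (by omega)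
      simp [this, List.range']
  | succ m ih =>
      have hk1 : k + 1 < arr.length := by omega
      have hd : arr.drop (k + 1) = arr[k + 1] :: arr.drop (k + 1 + 1) := List.drop_eq_getElem_cons hk1
      rw [hd, PySem.List.enumerate_cons, List.foldl_cons, List.range']
      have hg1 : arr[k + 1] = arr.getD (k + 1) 0 := (List.getD_eq_getElem _ _ hk1).symm
      have hmono : arr.getD k 0 ≤ arr.getD (k + 1) 0 := sorted_flatten_step arr xs ha k hk1
      have hdelta := pvG_delta arr P Q k hk1
      have hcast : ((k + 1 : Nat) : Int) + 1 = ((k + 1 + 1 : Nat) : Int) := by push_cast; ring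
      simp only [List.foldl_cons]
      by_cases hlt : arr.getD k 0 < arr[k + 1]
      · rw [if_pos hlt]
        have hcost : pvG arr P Q k + (arr[k + 1] - arr.getD k 0) * ((k + 1 : Nat) : Int) * P
            - (arr[k + 1] - arr.getD k 0) * ((arr.length : Int) - ((k + 1 : Nat) : Int)) * Q
            = pvG arr P Q (k + 1) := by
          rw [hg1, hdelta]; push_cast; ring
        rw [hcost, hg1, hcast]
        exact ih (k + 1) (by omega) (min ans (pvG arr P Q (k + 1))) (min_le_right _ _)
      · rw [if_neg hlt]
        have heq : arr.getD (k + 1) 0 = arr.getD k 0 := by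
          rw [hg1] at hlt; omega
        have hGeq : pvG arr P Q (k + 1) = pvG arr P Q k := by
          rw [hdelta, heq]; ring
        have hmin : min ans (pvG arr P Q (k + 1)) = ans :=
          min_eq_left (by rw [hGeq]; exact hans)
        have hrec := ih (k + 1) (by omega) ans (by rw [hGeq]; exact hans)
        rw [hGeq, heq] at hrec
        rw [hcast, hmin]
        exact hrec

theorem map_sub_mul_sum (l : List Int) (a q : Int) :
    (l.map (fun x => (x - a) * q)).sum = (l.sum - a * l.length) * q := by
  induction l with
  | nil => simp
  | cons x t ih =>
      simp only [List.map_cons, List.sum_cons, ih, List.length_cons]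
      push_cast; ring

theorem foldl_opt_min (g : Nat → Int) (l : List Nat) (b : Int) :
    l.foldl (fun o i => match o with
      | none => some (g i)
      | some bb => if g i < bb then some (g i) else some bb) (some b)
    = some (l.foldl (fun bb i => min bb (g i)) b) := by
  induction l generalizing b with
  | nil => rfl
  | cons x t ih =>
      rw [List.foldl_cons, List.foldl_cons]
      have h1 : (match (some b : Option Int) with
          | none => some (g x)
          | some bb => if g x < bb then some (g x) else some bb) = some (min b (g x)) := by
        show (if g x < b then some (g x) else some b) = some (min b (g x))
        split_ifs with h
        · rw [min_eq_right h.le]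
        · rw [min_eq_left (by omega : b ≤ g x)]
      rw [h1]
      exact ih _

-- B's result in closed form: the minimum of pvG over all candidate indices
theorem bside (land : List (List Int)) (P Q : Int)
    (hne : PySem.List.sorted land.flatten (fun x => x) false ≠ []) :
    solution_alt land P Q
    = (List.range' 1 ((PySem.List.sorted land.flatten (fun x => x) false).length - 1)).foldl
        (fun b i => min b (pvG (PySem.List.sorted land.flatten (fun x => x) false) P Q i))
        (pvG (PySem.List.sorted land.flatten (fun x => x) false) P Q 0) := by
  simp only [solution_alt, List.flatMap_id]
  set arr := PySem.List.sorted land.flatten (fun x => x) false with harr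
  have htot : List.foldl (fun acc h => acc + h) (0 : Int) arr = arr.sum := by
    simpa using PySem.List.foldl_add (fun h => h) (l := arr) (a := (0 : Int))
  rw [htot]
  obtain ⟨a, t, hat⟩ : ∃ a t, arr = a :: t := by
    cases harr2 : arr with
    | nil => exact absurd harr2 hne
    | cons a t => exact ⟨a, t, rfl⟩
  have hlen : arr.length = t.length + 1 := by rw [hat]; rfl
  have hb := b_fold arr P Q arr.length 0 (by omega) none
  simp only [List.drop_zero, Nat.cast_zero, pvS, List.take_zero, List.sum_nil] at hb
  rw [hb, hlen, Nat.add_sub_cancel, List.range', List.foldl_cons, foldl_opt_min]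
  try rfl

-- A's result in closed form: the same minimum
theorem aside (land : List (List Int)) (P Q : Int)
    (hne : PySem.List.sorted land.flatten (fun x => x) false ≠ []) :
    solution land P Q
    = (List.range' 1 ((PySem.List.sorted land.flatten (fun x => x) false).length - 1)).foldl
        (fun b i => min b (pvG (PySem.List.sorted land.flatten (fun x => x) false) P Q i))
        (pvG (PySem.List.sorted land.flatten (fun x => x) false) P Q 0) := by
  simp only [solution, PySem.List.foldl_append_eq_flatten, List.nil_append,
    PySem.List.foldl_add]
  set arr := PySem.List.sorted land.flatten (fun x => x) false with harr
  obtain ⟨a, t, hat⟩ : ∃ a t, arr = a :: t := by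
    cases harr2 : arr with
    | nil => exact absurd harr2 hne
    | cons a t => exact ⟨a, t, rfl⟩
  have hget : (PySem.List.pyGet? arr 0).getD 0 = a := by
    rw [hat]; simp [PySem.List.pyGet?, PySem.List.pyIdx?]
  rw [hget]
  have ha0 : arr.getD 0 0 = a := by rw [hat]; rfl
  have hlen : arr.length = t.length + 1 := by rw [hat]; rfl
  have hcost0 : 0 + (arr.map (fun x => (x - a) * Q)).sum = pvG arr P Q 0 := by
    rw [zero_add, map_sub_mul_sum]
    simp only [pvG, pvS, List.take_zero, List.sum_nil, ha0]
    push_cast; ring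
  rw [hcost0]
  have henum : PySem.List.enumerate arr 0 = ((0 : Int), a) :: PySem.List.enumerate t ((0 : Int) + 1) := by
    rw [hat, PySem.List.enumerate_cons]
  rw [henum]
  simp only [List.foldl_cons]
  rw [if_neg (lt_irrefl a)]
  rw [show ((0 : Int) + 1) = ((0 + 1 : Nat) : Int) from by push_cast]
  rw [show t = arr.drop (0 + 1) from by rw [hat]; rfl]
  have hmain := a_fold arr land.flatten harr P Q t.length 0 (by omega) (pvG arr P Q 0) le_rfl
  rw [ha0] at hmain
  rw [hmain, hlen, Nat.add_sub_cancel]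
  try rfl

-- ===== VERDICT (by name: the statement is the Claim_ definition above) =====
theorem solution_spec : Claim_equal_solution := by
  intro land P Q _hdom hpre
  have hne : PySem.List.sorted land.flatten (fun x => x) false ≠ [] := by
    intro h
    rw [PySem.List.sorted_eq_nil_iff] at h
    exact hpre h
  show solution land P Q = solution_alt land P Q
  rw [aside land P Q hne, bside land P Q hne]
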